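-- pv_equiv track=rewrite | github.com/chjacob-tubs/pyadf-releases | src/kf.py | stringForData
-- ===== SOURCE A (Python) =====
-- def stringForData(data):
--     count = 0
--     s = ""
--     for l in data:
--         if count == 80:
--             s = s + "\n"
--             count = 0
--         count = count + 1
--         if l: s = s + "T"
--         else: s = s + "F"
--     return s
-- ===== SOURCE B (Python) =====
-- def stringForData(data):
--     chars = ''.join('T' if l else 'F' for l in data)
--     parts = []
--     while chars:
--         parts.append(chars[:80])
--         chars = chars[80:]
--     return '\n'.join(parts)
-- ===== Notes on version B (the rewrite author's own statement) =====
-- stated objective: alternative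
-- what changed: Replaces A's counter-driven scan that interleaves newline insertion with character emission by first building the whole T/F string and then slicing it into 80-character chunks joined with '\n'.
import Mathlib
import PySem

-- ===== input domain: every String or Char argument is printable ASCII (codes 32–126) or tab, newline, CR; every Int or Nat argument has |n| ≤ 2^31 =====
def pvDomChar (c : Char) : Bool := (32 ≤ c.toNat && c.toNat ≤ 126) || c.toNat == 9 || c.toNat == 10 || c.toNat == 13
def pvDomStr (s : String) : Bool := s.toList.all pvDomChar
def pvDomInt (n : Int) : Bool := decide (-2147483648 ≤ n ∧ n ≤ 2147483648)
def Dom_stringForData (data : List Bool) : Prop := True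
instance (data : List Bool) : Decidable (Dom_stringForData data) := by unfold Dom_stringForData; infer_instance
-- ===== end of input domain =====

-- B replaces A's counter-driven single scan (newline when the running count hits 80) by
-- building the full T/F string first and then chunking it into 80-character slices joined
-- with newlines: objective 'alternative' (a different decomposition, same cost).

-- ===== PORT A =====
-- the loop body of A, as a helper
def pvStepA (st : Int × String) (l : Bool) : Int × String :=
  let count := st.1
  let s := st.2
  let (count, s) := if count = 80 then ((0 : Int), s ++ "\n") else (count, s)
  let count := count + 1
  let s := if l then s ++ "T" else s ++ "F"
  (count, s)

def stringForData (data : List Bool) : String :=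
  (data.foldl pvStepA ((0 : Int), "")).2

-- ===== PORT B =====
-- B's while-loop: peel off 80-character chunks of the remaining string
def pvChunks (cs : List Char) : List String :=
  if h : cs = [] then []
  else String.ofList (cs.take 80) :: pvChunks (cs.drop 80)
termination_by cs.length
decreasing_by
  have hp : 0 < cs.length := List.length_pos_iff.mpr h
  simp; omega

-- hand port of Python's '\n'.join(parts); exact: empty for [], else folds acc ++ '\n' ++ part
def pvJoinNL (parts : List String) : String :=
  match parts with
  | [] => ""
  | a :: as => as.foldl (fun acc p => acc ++ "\n" ++ p) a

def stringForData_alt (data : List Bool) : String :=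
  let chars : List Char := data.map (fun l => if l then 'T' else 'F')
  pvJoinNL (pvChunks chars)

-- ===== PRECONDITION & SPEC =====
def Spec_stringForData (data : List Bool) (out : String) : Prop := out = stringForData_alt data
instance (data : List Bool) (out : String) : Decidable (Spec_stringForData data out) := by unfold Spec_stringForData; infer_instance

-- ===== CLAIM (what is proved, stated in full; the proofs are below) =====
def Claim_equal_stringForData : Prop := ∀ (data : List Bool), Dom_stringForData data → Spec_stringForData data (stringForData data)

-- ===== LEMMAS AND PROOFS =====

def pvCh (l : Bool) : Char := if l then 'T' else 'F'

-- the character stream A emits, as a function of the running count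
def pvEmit : Int → List Bool → List Char
  | _, [] => []
  | c, l :: ls =>
    if c = 80 then '\n' :: pvCh l :: pvEmit 1 ls
    else pvCh l :: pvEmit (c + 1) ls

-- the character stream B emits: 80-char chunks separated by newlines
def pvJ (cs : List Char) : List Char :=
  if h : cs = [] then []
  else cs.take 80 ++ (if cs.drop 80 = [] then [] else '\n' :: pvJ (cs.drop 80))
termination_by cs.length
decreasing_by
  have hp : 0 < cs.length := List.length_pos_iff.mpr h
  simp; omega

lemma pvFold_emit (data : List Bool) : ∀ (c : Int) (s : String),
    (data.foldl pvStepA (c, s)).2 = s ++ String.ofList (pvEmit c data) := by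
  induction data with
  | nil => intro c s; apply String.toList_inj.mp; simp [pvEmit]
  | cons l ls ih =>
    intro c s
    rw [List.foldl_cons]
    by_cases hc : c = 80
    · subst hc
      have hstep : pvStepA (80, s) l = (1, (if l then (s ++ "\n") ++ "T" else (s ++ "\n") ++ "F")) := by
        simp [pvStepA]
      rw [hstep, ih]
      apply String.toList_inj.mp
      cases l <;> simp [pvEmit, pvCh]
    · have hstep : pvStepA (c, s) l = (c + 1, (if l then s ++ "T" else s ++ "F")) := by
        simp [pvStepA, hc]
      rw [hstep, ih]
      apply String.toList_inj.mp
      cases l <;> simp [pvEmit, hc, pvCh]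

lemma pvEmit_eq (data : List Bool) : ∀ (c : Int), 0 ≤ c → c ≤ 80 →
    pvEmit c data = (data.take (80 - c).toNat).map pvCh ++
      (if data.drop (80 - c).toNat = [] then []
       else '\n' :: pvEmit 0 (data.drop (80 - c).toNat)) := by
  induction data with
  | nil => intro c _ _; simp [pvEmit]
  | cons l ls ih =>
    intro c h0 h80
    by_cases hc : c = 80
    · subst hc
      simp [pvEmit]
    · have hlt : c < 80 := lt_of_le_of_ne h80 hc
      obtain ⟨k, hk⟩ : ∃ k : ℕ, (80 - c).toNat = k + 1 := by
        refine ⟨(80 - (c + 1)).toNat, ?_⟩; omega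
      have hk' : (80 - (c + 1)).toNat = k := by omega
      simp only [pvEmit, if_neg hc]
      rw [ih (c + 1) (by omega) (by omega), hk, hk']
      simp

lemma pvEmit_zero_eq_pvJ (data : List Bool) :
    pvEmit 0 data = pvJ (data.map pvCh) := by
  by_cases h : data = []
  · subst h; simp [pvEmit, pvJ]
  · have hmap : data.map pvCh ≠ [] := by simp [h]
    rw [pvJ, dif_neg hmap]
    rw [pvEmit_eq data 0 (by norm_num) (by norm_num)]
    have h80 : ((80 : Int) - 0).toNat = 80 := by decide
    rw [h80]
    rw [← List.map_take, ← List.map_drop]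
    by_cases hd : data.drop 80 = []
    · simp [hd]
    · have hd' : (data.drop 80).map pvCh ≠ [] := by simp only [ne_eq, List.map_eq_nil_iff]; exact hd
      rw [if_neg hd, if_neg (by simpa using hd')]
      rw [pvEmit_zero_eq_pvJ (data.drop 80)]
  termination_by data.length
  decreasing_by
    have hp : 0 < data.length := List.length_pos_iff.mpr h
    simp only [List.length_drop]; omega

lemma pvChunks_flatMap (cs : List Char) :
    (pvChunks cs).flatMap (fun p => '\n' :: p.toList) =
      if cs = [] then [] else '\n' :: pvJ cs := by
  by_cases h : cs = []
  · subst h; simp [pvChunks]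
  · rw [pvChunks, dif_neg h, if_neg h, pvJ, dif_neg h]
    rw [List.flatMap_cons]
    rw [pvChunks_flatMap (cs.drop 80)]
    by_cases hd : cs.drop 80 = [] <;> simp [hd]
  termination_by cs.length
  decreasing_by
    have hp : 0 < cs.length := List.length_pos_iff.mpr h
    simp; omega

lemma pvJoinNL_foldl (as : List String) : ∀ (a : String),
    (as.foldl (fun acc p => acc ++ "\n" ++ p) a).toList =
      a.toList ++ as.flatMap (fun p => '\n' :: p.toList) := by
  induction as with
  | nil => intro a; simp
  | cons b bs ih => intro a; rw [List.foldl_cons, ih]; simp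

lemma pvJoinNL_chunks (cs : List Char) :
    (pvJoinNL (pvChunks cs)).toList = pvJ cs := by
  by_cases h : cs = []
  · subst h; simp [pvChunks, pvJoinNL, pvJ]
  · rw [pvJ, dif_neg h, pvChunks, dif_neg h]
    simp only [pvJoinNL]
    rw [pvJoinNL_foldl]
    rw [pvChunks_flatMap (cs.drop 80)]
    by_cases hd : cs.drop 80 = [] <;> simp [hd]

-- ===== VERDICT (by name: the statement is the Claim_ definition above) =====
theorem stringForData_spec : Claim_equal_stringForData := by
  intro data _
  unfold Spec_stringForData stringForData stringForData_alt
  apply String.toList_inj.mp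
  rw [pvFold_emit data 0 ""]
  rw [pvJoinNL_chunks]
  have hch : (fun l : Bool => if l then 'T' else 'F') = pvCh := by funext l; rfl
  rw [hch, ← pvEmit_zero_eq_pvJ]
  simp
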